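-- pv_equiv track=rewrite | github.com/proman3419/AGH-WIET-INF-WDI-2020 | 3/9.py | longest_inc_seq
-- ===== SOURCE A (Python) =====
-- def longest_inc_seq(t, N):
--   longest = 0
--   for i in range(N):
--     curr = 0
--     for j in range(i+1, N):
--       if t[j] <= t[i]:
--         break
--       curr += 1
--     if curr > longest:
--       longest = curr
--
--   return longest
-- ===== SOURCE B (Python) =====
-- def longest_inc_seq(t, N):
--     # O(N) monotonic stack, scanning right-to-left.
--     # stack holds (value, run) pairs: 'run' is the length of the run of
--     # consecutive strictly-greater elements that follows 'value'.
--     longest = 0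
--     stack = []
--     for i in range(N - 1, -1, -1):
--         x = t[i]
--         c = 0
--         while stack and stack[-1][0] > x:
--             _, cc = stack.pop()
--             c += 1 + cc
--         stack.append((x, c))
--         if c > longest:
--             longest = c
--     return longest
-- ===== Notes on version B (the rewrite author's own statement) =====
-- stated objective: faster
-- what changed: Replaced the per-start rescan (for each i, scan right until an element <= t[i]) by a single right-to-left pass with a monotonic stack of (value, run-length) pairs, so each element is pushed and popped at most once.
-- outside the precondition, e.g. on longest_inc_seq([], 1): A returns 0, B raises IndexError
import Mathlib
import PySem

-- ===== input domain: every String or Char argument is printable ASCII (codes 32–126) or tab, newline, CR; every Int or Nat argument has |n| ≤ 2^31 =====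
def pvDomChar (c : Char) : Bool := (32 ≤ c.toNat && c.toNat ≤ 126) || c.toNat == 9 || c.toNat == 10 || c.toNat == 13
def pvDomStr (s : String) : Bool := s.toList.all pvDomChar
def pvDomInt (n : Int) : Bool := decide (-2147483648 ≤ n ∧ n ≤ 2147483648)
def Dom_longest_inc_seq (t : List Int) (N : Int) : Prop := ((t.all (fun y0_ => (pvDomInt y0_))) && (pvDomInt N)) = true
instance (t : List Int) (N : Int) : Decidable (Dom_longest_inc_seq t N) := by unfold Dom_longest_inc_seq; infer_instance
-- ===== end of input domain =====

-- B replaces A's per-start rescan by one right-to-left monotonic-stack pass (asymptotically faster); equal return values proved below.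

-- ===== PORT A =====
-- inner loop 'for j in range(i+1, N): if t[j] <= t[i]: break; curr += 1'
def pvInnerA (t : List Int) (ti : Int) : List Int → Int
  | [] => 0
  | j :: js => if PySem.List.pyGetD t j 0 ≤ ti then 0 else 1 + pvInnerA t ti js

def longest_inc_seq (t : List Int) (N : Int) : Int :=
  (PySem.List.pyRange 0 N 1).foldl
    (fun longest i =>
      let curr := pvInnerA t (PySem.List.pyGetD t i 0) (PySem.List.pyRange (i + 1) N 1)
      if curr > longest then curr else longest) 0

-- ===== PORT B =====
-- inner 'while stack and stack[-1][0] > x: pop; c += 1 + cc'  (stack top at the head)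
def pvPopB (x : Int) (c : Int) : List (Int × Int) → Int × List (Int × Int)
  | [] => (c, [])
  | (v, cc) :: st => if x < v then pvPopB x (c + 1 + cc) st else (c, (v, cc) :: st)

def pvStepB (t : List Int) (st : Int × List (Int × Int)) (i : Int) : Int × List (Int × Int) :=
  let x := PySem.List.pyGetD t i 0
  let p := pvPopB x 0 st.2
  (if p.1 > st.1 then p.1 else st.1, (x, p.1) :: p.2)

def longest_inc_seq_alt (t : List Int) (N : Int) : Int :=
  ((PySem.List.pyRange (N - 1) (-1) (-1)).foldl (pvStepB t) (0, [])).1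

-- ===== PRECONDITION & SPEC =====
-- Pre_ excludes N > len(t), where A raises IndexError for every input except the vacuous corner
-- t = [], N = 1 (A's inner range is empty so no index is touched and it returns 0; B indexes t[0] and raises).
def Pre_longest_inc_seq (t : List Int) (N : Int) : Prop := N ≤ (t.length : Int)
instance (t : List Int) (N : Int) : Decidable (Pre_longest_inc_seq t N) := by unfold Pre_longest_inc_seq; infer_instance
def pvWitness_longest_inc_seq : List Int × Int := ([1, 3, 2, 4], 4)

def Spec_longest_inc_seq (t : List Int) (N : Int) (out : Int) : Prop := out = longest_inc_seq_alt t N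
instance (t : List Int) (N : Int) (out : Int) : Decidable (Spec_longest_inc_seq t N out) := by unfold Spec_longest_inc_seq; infer_instance

-- ===== CLAIM (what is proved, stated in full; the proofs are below) =====
def Claim_equal_longest_inc_seq : Prop := ∀ (t : List Int) (N : Int), Dom_longest_inc_seq t N → Pre_longest_inc_seq t N → Spec_longest_inc_seq t N (longest_inc_seq t N)

-- ===== LEMMAS AND PROOFS =====

-- count of consecutive elements of r strictly above x (the value of A's inner loop)
def pvCnt (x : Int) (r : List Int) : Int := ((r.takeWhile (fun y => decide (x < y))).length : Int)

-- max over all start positions (the common specification both ports meet)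
def pvMaxCnt : List Int → Int
  | [] => 0
  | x :: r => max (pvCnt x r) (pvMaxCnt r)

lemma pvCnt_nonneg (x : Int) (r : List Int) : 0 ≤ pvCnt x r := by
  simp [pvCnt]

lemma pvMaxCnt_nonneg (s : List Int) : 0 ≤ pvMaxCnt s := by
  induction s with
  | nil => simp [pvMaxCnt]
  | cons x r ih => simp [pvMaxCnt]; right; exact ih

lemma pvCnt_cons_le (x y : Int) (r : List Int) (h : y ≤ x) : pvCnt x (y :: r) = 0 := by
  simp [pvCnt, not_lt.mpr h]

lemma pvCnt_cons_gt (x y : Int) (r : List Int) (h : x < y) : pvCnt x (y :: r) = 1 + pvCnt x r := by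
  simp [pvCnt, h]; omega

-- ---- A-side: the inner loop computes pvCnt, the outer loop folds max ----

lemma pvInnerA_eq (t : List Int) (n : Nat) (hn : n ≤ t.length) (ti : Int) :
    ∀ (d j : Nat), n - j = d →
      pvInnerA t ti (PySem.List.pyRange (j : Int) (n : Int) 1)
        = pvCnt ti ((t.drop j).take (n - j)) := by
  intro d
  induction d with
  | zero =>
    intro j hj
    rw [PySem.List.pyRange_one_eq_nil (by omega)]
    have : n - j = 0 := hj
    simp [this, pvInnerA, pvCnt]
  | succ d ih =>
    intro j hj
    have hjn : j < n := by omega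
    have hjt : j < t.length := by omega
    rw [PySem.List.pyRange_one_cons (by exact_mod_cast hjn)]
    have hdrop : t.drop j = t[j] :: t.drop (j + 1) := List.drop_eq_getElem_cons hjt
    have htake : (t.drop j).take (n - j) = t[j] :: (t.drop (j + 1)).take (n - (j + 1)) := by
      rw [hdrop]
      have : n - j = (n - (j + 1)) + 1 := by omega
      rw [this, List.take_succ_cons]
    have hget : PySem.List.pyGetD t (j : Int) 0 = t[j] := by
      simp [PySem.List.pyGetD_natCast, List.getD_eq_getElem?_getD, hjt]
    rw [htake]
    show (if PySem.List.pyGetD t (j:Int) 0 ≤ ti then 0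
          else 1 + pvInnerA t ti (PySem.List.pyRange ((j:Int) + 1) (n:Int) 1)) = _
    rw [hget]
    by_cases h : t[j] ≤ ti
    · rw [if_pos h, pvCnt_cons_le ti t[j] _ h]
    · rw [if_neg h, pvCnt_cons_gt ti t[j] _ (by omega)]
      have hcast : ((j : Int) + 1) = ((j + 1 : Nat) : Int) := by push_cast; ring
      rw [hcast, ih (j + 1) (by omega)]

lemma pvOuterA_eq (t : List Int) (n : Nat) (hn : n ≤ t.length) :
    ∀ (d j : Nat), n - j = d → ∀ (L : Int), 0 ≤ L →
      (PySem.List.pyRange (j : Int) (n : Int) 1).foldl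
        (fun longest i =>
          let curr := pvInnerA t (PySem.List.pyGetD t i 0) (PySem.List.pyRange (i + 1) (n : Int) 1)
          if curr > longest then curr else longest) L
        = max L (pvMaxCnt ((t.drop j).take (n - j))) := by
  intro d
  induction d with
  | zero =>
    intro j hj L hL
    rw [PySem.List.pyRange_one_eq_nil (by omega)]
    have : n - j = 0 := hj
    simp [this, pvMaxCnt]
    omega
  | succ d ih =>
    intro j hj L hL
    have hjn : j < n := by omega
    have hjt : j < t.length := by omega
    rw [PySem.List.pyRange_one_cons (by exact_mod_cast hjn)]
    have hget : PySem.List.pyGetD t (j : Int) 0 = t[j] := by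
      simp [PySem.List.pyGetD_natCast, List.getD_eq_getElem?_getD, hjt]
    have hcast : ((j : Int) + 1) = ((j + 1 : Nat) : Int) := by push_cast; ring
    have hdrop : t.drop j = t[j] :: t.drop (j + 1) := List.drop_eq_getElem_cons hjt
    have htake : (t.drop j).take (n - j) = t[j] :: (t.drop (j + 1)).take (n - (j + 1)) := by
      rw [hdrop]
      have : n - j = (n - (j + 1)) + 1 := by omega
      rw [this, List.take_succ_cons]
    simp only [List.foldl_cons]
    rw [hget, hcast, pvInnerA_eq t n hn t[j] (n - (j+1)) (j+1) rfl]
    set c := pvCnt t[j] ((t.drop (j + 1)).take (n - (j + 1))) with hc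
    have hcnn : 0 ≤ c := pvCnt_nonneg _ _
    have hite : (if c > L then c else L) = max L c := by split <;> omega
    rw [hite, ih (j + 1) (by omega) (max L c) (by omega)]
    rw [htake]
    show max (max L c) _ = max L (pvMaxCnt (t[j] :: (t.drop (j + 1)).take (n - (j + 1))))
    simp only [pvMaxCnt, ← hc]
    omega

lemma pvA_eq (t : List Int) (N : Int) (hN : N ≤ (t.length : Int)) :
    longest_inc_seq t N = pvMaxCnt (t.take N.toNat) := by
  by_cases h : N ≤ 0
  · have hz : N.toNat = 0 := by omega
    unfold longest_inc_seq
    rw [PySem.List.pyRange_one_eq_nil (by omega)]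
    simp [hz, pvMaxCnt]
  · have hn : N = ((N.toNat : Nat) : Int) := by omega
    have key := pvOuterA_eq t N.toNat (by omega) N.toNat 0 (by omega) 0 le_rfl
    simp only [Nat.cast_zero, Nat.sub_zero, List.drop_zero] at key
    unfold longest_inc_seq
    rw [hn, key]
    have hnn := pvMaxCnt_nonneg (t.take N.toNat)
    simp only [Int.toNat_natCast]
    omega

-- ---- B-side: stack invariant (the stack decomposes the processed suffix) ----

def pvHeadLE (x : Int) : List (Int × Int) → Prop
  | [] => True
  | (v, _) :: _ => v ≤ x

def pvDecomp : List (Int × Int) → List Int → Prop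
  | [], s => s = []
  | (v, c) :: st, s =>
      ∃ r s', s = v :: (r ++ s') ∧ ((r.length : Int) = c) ∧ (∀ y ∈ r, v < y) ∧
        pvHeadLE v st ∧ pvDecomp st s'

lemma pvCnt_stop (x : Int) (s' : List Int) (st : List (Int × Int))
    (h : pvHeadLE x st) (hd : pvDecomp st s') : pvCnt x s' = 0 := by
  match st with
  | [] => simp [pvDecomp] at hd; simp [hd, pvCnt]
  | (v, c) :: st2 =>
    obtain ⟨r, s'', hs, _, _, _, _⟩ := hd
    have hvx : v ≤ x := h
    rw [hs, pvCnt_cons_le x v _ hvx]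

lemma pvCnt_run (x : Int) (r s' : List Int) (hr : ∀ y ∈ r, x < y) (h0 : pvCnt x s' = 0) :
    pvCnt x (r ++ s') = (r.length : Int) := by
  induction r with
  | nil => simpa using h0
  | cons y r ih =>
    have hy : x < y := hr y (by simp)
    rw [List.cons_append, pvCnt_cons_gt x y _ hy, ih (fun z hz => hr z (by simp [hz]))]
    simp only [List.length_cons]
    push_cast
    ring

lemma pvPopB_spec (x : Int) :
    ∀ (st : List (Int × Int)) (s : List Int) (c : Int), pvDecomp st s →
      ∃ r s' st', pvPopB x c st = (c + (r.length : Int), st') ∧ s = r ++ s' ∧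
        (∀ y ∈ r, x < y) ∧ pvDecomp st' s' ∧ pvHeadLE x st' := by
  intro st
  induction st with
  | nil =>
    intro s c hd
    simp [pvDecomp] at hd
    exact ⟨[], [], [], by simp [pvPopB], by simp [hd], by simp, by simp [pvDecomp], trivial⟩
  | cons p st2 ih =>
    obtain ⟨v, cc⟩ := p
    intro s c hd
    obtain ⟨r2, s2, hs, hlen, hgt, hhead, hd2⟩ := hd
    by_cases hx : x < v
    · obtain ⟨r', s'', st', hpop, hs2, hgt', hd', hh'⟩ := ih s2 (c + 1 + cc) hd2
      refine ⟨v :: (r2 ++ r'), s'', st', ?_, ?_, ?_, hd', hh'⟩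
      · show pvPopB x c ((v, cc) :: st2) = _
        simp only [pvPopB, if_pos hx]
        rw [hpop]
        congr 1
        simp only [List.length_cons, List.length_append]
        push_cast
        omega
      · rw [hs, hs2]; simp
      · intro y hy
        rcases List.mem_cons.mp hy with h | h
        · omega
        · rcases List.mem_append.mp h with h2 | h2
          · exact lt_trans hx (hgt y h2)
          · exact hgt' y h2
    · refine ⟨[], s, (v, cc) :: st2, ?_, by simp, by simp, ?_, ?_⟩
      · show pvPopB x c ((v, cc) :: st2) = _
        simp only [pvPopB, if_neg hx]
        norm_num
      · exact ⟨r2, s2, hs, hlen, hgt, hhead, hd2⟩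
      · show v ≤ x
        omega

lemma pvRunB_eq (t : List Int) (n : Nat) (hn : n ≤ t.length) :
    ∀ (d k : Nat), n - k = d →
      (((PySem.List.pyRange (k : Int) (n : Int) 1).reverse).foldl (pvStepB t) (0, [])).1
          = pvMaxCnt ((t.drop k).take (n - k)) ∧
        pvDecomp (((PySem.List.pyRange (k : Int) (n : Int) 1).reverse).foldl (pvStepB t) (0, [])).2
          ((t.drop k).take (n - k)) := by
  intro d
  induction d with
  | zero =>
    intro k hk
    rw [PySem.List.pyRange_one_eq_nil (by omega)]
    have : n - k = 0 := hk
    simp [this, pvMaxCnt, pvDecomp]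
  | succ d ih =>
    intro k hk
    have hkn : k < n := by omega
    have hkt : k < t.length := by omega
    rw [PySem.List.pyRange_one_cons (by exact_mod_cast hkn)]
    have hcast : ((k : Int) + 1) = ((k + 1 : Nat) : Int) := by push_cast; ring
    rw [List.reverse_cons, List.foldl_append, hcast]
    obtain ⟨ih1, ih2⟩ := ih (k + 1) (by omega)
    set res := ((PySem.List.pyRange ((k + 1 : Nat) : Int) (n : Int) 1).reverse).foldl (pvStepB t) ((0 : Int), ([] : List (Int × Int))) with hres
    have hget : PySem.List.pyGetD t (k : Int) 0 = t[k] := by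
      simp [PySem.List.pyGetD_natCast, List.getD_eq_getElem?_getD, hkt]
    have hdrop : t.drop k = t[k] :: t.drop (k + 1) := List.drop_eq_getElem_cons hkt
    have htake : (t.drop k).take (n - k) = t[k] :: (t.drop (k + 1)).take (n - (k + 1)) := by
      rw [hdrop]
      have : n - k = (n - (k + 1)) + 1 := by omega
      rw [this, List.take_succ_cons]
    set suf := (t.drop (k + 1)).take (n - (k + 1)) with hsuf
    obtain ⟨r, s', st', hpop, hs, hgt, hd', hh'⟩ := pvPopB_spec t[k] res.2 suf 0 ih2
    have hcnt : pvCnt t[k] suf = (r.length : Int) := by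
      rw [hs]
      exact pvCnt_run t[k] r s' hgt (pvCnt_stop t[k] s' st' hh' hd')
    have hstep : pvStepB t res (k : Int) =
        (if (r.length : Int) > res.1 then (r.length : Int) else res.1, (t[k], (r.length : Int)) :: st') := by
      simp only [pvStepB, hget, hpop]
      norm_num
    rw [List.foldl_cons, List.foldl_nil, hstep, htake]
    constructor
    · show _ = pvMaxCnt (t[k] :: suf)
      simp only [pvMaxCnt, ih1, hcnt]
      have := pvMaxCnt_nonneg suf
      split <;> omega
    · exact ⟨r, s', by rw [hs], rfl, hgt, hh', hd'⟩

lemma pvB_eq (t : List Int) (N : Int) (hN : N ≤ (t.length : Int)) :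
    longest_inc_seq_alt t N = pvMaxCnt (t.take N.toNat) := by
  unfold longest_inc_seq_alt
  have hrev : PySem.List.pyRange (N - 1) (-1) (-1) = (PySem.List.pyRange 0 N 1).reverse := by
    rw [PySem.List.pyRange_neg_one_eq_reverse]
    norm_num
  rw [hrev]
  by_cases h : N ≤ 0
  · have hz : N.toNat = 0 := by omega
    rw [PySem.List.pyRange_one_eq_nil (by omega)]
    simp [hz, pvMaxCnt]
  · have hn : N = ((N.toNat : Nat) : Int) := by omega
    have key := (pvRunB_eq t N.toNat (by omega) N.toNat 0 (by omega)).1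
    simp only [Nat.cast_zero, Nat.sub_zero, List.drop_zero] at key
    rw [hn, key]
    have h2 : ((N.toNat : Int)).toNat = N.toNat := by omega
    rw [h2]


-- ===== VERDICT (by name: the statement is the Claim_ definition above) =====
theorem longest_inc_seq_spec : Claim_equal_longest_inc_seq := by
  intro t N _ hPre
  unfold Spec_longest_inc_seq
  rw [pvA_eq t N hPre, pvB_eq t N hPre]
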